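-- pv_equiv track=rewrite | github.com/TheAlgorithms/Python | project_euler/problem_165/sol1.py | count_true_intersections
-- ===== SOURCE A (Python) =====
-- def is_true_intersection(segment1, segment2):
--     (x1, y1), (x2, y2) = segment1
--     (x3, y3), (x4, y4) = segment2
--
--     # Check if segments share a common point that is an interior point
--     if x1 == x2 == x3 == x4 and min(y1, y2) < y3 < max(y1, y2):
--         return True
--
--     return False
--
-- def count_true_intersections(segments):
--     count = 0
--     n = len(segments)
--
--     for i in range(n):
--         for j in range(i + 1, n):
--             if is_true_intersection(segments[i], segments[j]):
--                 count += 1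
--
--     return count
-- ===== SOURCE B (Python) =====
-- def count_true_intersections(segments):
--     count = 0
--     by_x = {}
--     for (x1, y1), (x2, y2) in segments:
--         if x1 == x2:
--             intervals = by_x.setdefault(x1, [])
--             for lo, hi in intervals:
--                 if lo < y1 < hi:
--                     count += 1
--             intervals.append((min(y1, y2), max(y1, y2)))
--     return count
-- ===== Notes on version B (the rewrite author's own statement) =====
-- stated objective: faster
-- what changed: Replaced the all-pairs double loop by a single left-to-right pass keeping a dict from x-coordinate to the (min,max) y-intervals of earlier vertical segments, so only same-x vertical candidates are ever compared.
import Mathlib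
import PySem

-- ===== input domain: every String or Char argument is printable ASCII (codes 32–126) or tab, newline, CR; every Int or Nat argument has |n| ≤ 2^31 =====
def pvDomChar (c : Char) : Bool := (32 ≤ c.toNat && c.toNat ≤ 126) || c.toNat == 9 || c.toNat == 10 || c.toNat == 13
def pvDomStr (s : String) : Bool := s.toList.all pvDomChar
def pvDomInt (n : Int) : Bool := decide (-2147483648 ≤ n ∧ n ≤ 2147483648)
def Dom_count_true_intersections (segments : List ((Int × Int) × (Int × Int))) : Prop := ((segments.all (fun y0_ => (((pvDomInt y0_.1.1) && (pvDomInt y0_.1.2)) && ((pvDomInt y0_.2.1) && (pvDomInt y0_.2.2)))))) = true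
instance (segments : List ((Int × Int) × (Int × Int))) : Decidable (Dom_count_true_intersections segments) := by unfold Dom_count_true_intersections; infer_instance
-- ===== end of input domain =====

-- B replaces A's all-pairs double loop by one pass over the segments with a dict from
-- x-coordinate to the y-intervals of the earlier vertical segments at that x (objective: faster).

-- ===== PORT A =====
def is_true_intersection (segment1 segment2 : (Int × Int) × (Int × Int)) : Bool :=
  let ((x1, y1), (x2, y2)) := segment1
  let ((x3, y3), (x4, _y4)) := segment2
  -- 'x1 == x2 == x3 == x4 and min(y1, y2) < y3 < max(y1, y2)'
  if x1 = x2 ∧ x2 = x3 ∧ x3 = x4 ∧ min y1 y2 < y3 ∧ y3 < max y1 y2 then true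
  else false

def count_true_intersections (segments : List ((Int × Int) × (Int × Int))) : Int :=
  let count : Int := 0
  let n : Int := segments.length
  (PySem.List.pyRange 0 n 1).foldl (fun count i =>
    (PySem.List.pyRange (i + 1) n 1).foldl (fun count j =>
      if is_true_intersection (PySem.List.pyGetD segments i ((0, 0), (0, 0)))
                              (PySem.List.pyGetD segments j ((0, 0), (0, 0))) then
        count + 1
      else count) count) count

-- ===== PORT B =====
-- one pass; state = (count, dict x ↦ list of (lo, hi) intervals of earlier vertical segments at x);
-- 'setdefault(x1, []) … append(...)' becomes re-inserting the extended list at x1.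
def count_true_intersections_alt (segments : List ((Int × Int) × (Int × Int))) : Int :=
  let st := segments.foldl
    (fun (st : Int × PySem.Dict Int (List (Int × Int))) seg =>
      let ((x1, y1), (x2, y2)) := seg
      if x1 = x2 then
        let intervals := st.2.getD x1 []
        let count := intervals.foldl
          (fun c lohi => if lohi.1 < y1 ∧ y1 < lohi.2 then c + 1 else c) st.1
        (count, st.2.insert x1 (intervals ++ [(min y1 y2, max y1 y2)]))
      else st)
    (0, PySem.Dict.empty)
  st.1

-- ===== PRECONDITION & SPEC =====
def Spec_count_true_intersections (segments : List ((Int × Int) × (Int × Int))) (out : Int) : Prop := out = count_true_intersections_alt segments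
instance (segments : List ((Int × Int) × (Int × Int))) (out : Int) : Decidable (Spec_count_true_intersections segments out) := by unfold Spec_count_true_intersections; infer_instance

-- ===== CLAIM (what is proved, stated in full; the proofs are below) =====
def Claim_equal_count_true_intersections : Prop := ∀ (segments : List ((Int × Int) × (Int × Int))), Dom_count_true_intersections segments → Spec_count_true_intersections segments (count_true_intersections segments)

-- ===== LEMMAS AND PROOFS =====

-- reference value: for each segment, how many LATER segments it truly intersects as 'segment1'
def pairCount : List ((Int × Int) × (Int × Int)) → Int
  | [] => 0
  | s :: rest => (rest.countP (fun t => is_true_intersection s t) : Int) + pairCount rest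

-- A's outer loop as a sum over i of the inner loop's count
theorem A_eq_sum (l : List ((Int × Int) × (Int × Int))) :
    count_true_intersections l =
      ((PySem.List.pyRange 0 (l.length : Int) 1).map
        (fun i => ((l.drop (i + 1).toNat).countP
          (fun t => is_true_intersection (PySem.List.pyGetD l i ((0, 0), (0, 0))) t) : Int))).sum := by
  unfold count_true_intersections
  rw [PySem.List.foldl_congr_mem
        (g := fun count i => count + ((l.drop (i + 1).toNat).countP
          (fun t => is_true_intersection (PySem.List.pyGetD l i ((0, 0), (0, 0))) t) : Int))]
  · rw [PySem.List.foldl_add]; simp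
  · intro acc i hi
    have h0 : (0 : Int) ≤ i + 1 := by
      have := (PySem.List.mem_pyRange_one.mp hi).1; omega
    rw [PySem.List.foldl_pyRange_pyGetD' l ((0, 0), (0, 0))
          (fun c t => if is_true_intersection (PySem.List.pyGetD l i ((0, 0), (0, 0))) t then c + 1 else c)
          acc h0,
        PySem.List.foldl_count_if]

theorem sum_eq_pairCount (l : List ((Int × Int) × (Int × Int))) :
    ((PySem.List.pyRange 0 (l.length : Int) 1).map
      (fun i => ((l.drop (i + 1).toNat).countP
        (fun t => is_true_intersection (PySem.List.pyGetD l i ((0, 0), (0, 0))) t) : Int))).sum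
    = pairCount l := by
  induction l with
  | nil => simp [pairCount]
  | cons s rest ih =>
    rw [PySem.List.pyRange_one] at ih ⊢
    simp only [List.length_cons]
    have hlen : ((((rest.length + 1 : Nat)) : Int) - 0).toNat = rest.length + 1 := by omega
    have hlen' : (((rest.length : Nat) : Int) - 0).toNat = rest.length := by omega
    rw [hlen]; rw [hlen'] at ih
    rw [List.range_succ_eq_map]
    simp only [List.map_cons, List.map_map, List.sum_cons]
    rw [pairCount]
    simp only [List.map_map] at ih
    congr 1
    · norm_num
    · rw [← ih]
      apply congrArg List.sum
      apply List.map_congr_left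
      intro k _
      simp only [Function.comp_apply, Nat.succ_eq_add_one]
      have e1 : (0 : Int) + ((k + 1 : Nat) : Int) = (((k + 1 : Nat)) : Int) := by ring
      have e2 : (0 : Int) + ((k : Nat) : Int) = ((k : Nat) : Int) := by ring
      rw [e1, e2, PySem.List.pyGetD_natCast, PySem.List.pyGetD_natCast]
      have e3 : ((((k + 1 : Nat)) : Int) + 1).toNat = k + 2 := by omega
      have e4 : (((k : Nat) : Int) + 1).toNat = k + 1 := by omega
      rw [e3, e4]
      simp [List.getD]

-- B's fold step, named for the proofs (definitionally the lambda in the port)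
def bStep (st : Int × PySem.Dict Int (List (Int × Int)))
    (seg : (Int × Int) × (Int × Int)) : Int × PySem.Dict Int (List (Int × Int)) :=
  let ((x1, y1), (x2, y2)) := seg
  if x1 = x2 then
    let intervals := st.2.getD x1 []
    let count := intervals.foldl
      (fun c lohi => if lohi.1 < y1 ∧ y1 < lohi.2 then c + 1 else c) st.1
    (count, st.2.insert x1 (intervals ++ [(min y1 y2, max y1 y2)]))
  else st

theorem alt_eq_bStep (l : List ((Int × Int) × (Int × Int))) :
    count_true_intersections_alt l = (l.foldl bStep (0, PySem.Dict.empty)).1 := rfl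

-- appending one segment adds exactly the true intersections with the earlier segments
theorem pairCount_append (l : List ((Int × Int) × (Int × Int))) (s : (Int × Int) × (Int × Int)) :
    pairCount (l ++ [s]) = pairCount l + (l.countP (fun t => is_true_intersection t s) : Int) := by
  induction l with
  | nil => simp [pairCount]
  | cons a l ih =>
    simp only [List.cons_append, pairCount, List.countP_append, List.countP_cons, ih]
    simp
    ring

-- invariant: count is pairCount of the processed prefix, and the dict holds, per x, the
-- (min, max) y-intervals of the processed vertical segments at x, in order
theorem bStep_invariant (l : List ((Int × Int) × (Int × Int))) :
    (l.foldl bStep (0, PySem.Dict.empty)).1 = pairCount l ∧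
    ∀ x : Int, (l.foldl bStep (0, PySem.Dict.empty)).2.getD x []
      = (l.filter (fun seg => decide (seg.1.1 = seg.2.1) && decide (seg.1.1 = x))).map
          (fun seg => (min seg.1.2 seg.2.2, max seg.1.2 seg.2.2)) := by
  induction l using List.reverseRecOn with
  | nil =>
    refine ⟨rfl, fun x => ?_⟩
    simp [pysem]
  | append_singleton l s ih =>
    obtain ⟨ihc, ihd⟩ := ih
    obtain ⟨⟨x1, y1⟩, ⟨x2, y2⟩⟩ := s
    rw [List.foldl_append, List.foldl_cons, List.foldl_nil]
    by_cases hv : x1 = x2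
    · constructor
      · simp only [bStep, if_pos hv]
        show ((((l.foldl bStep (0, PySem.Dict.empty)).2.getD x1 []).foldl
            (fun c lohi => if lohi.1 < y1 ∧ y1 < lohi.2 then c + 1 else c)
            (l.foldl bStep (0, PySem.Dict.empty)).1) : Int) = _
        rw [ihd x1, ihc, pairCount_append]
        have : ∀ (c : Int) (xs : List (Int × Int)),
            xs.foldl (fun c lohi => if lohi.1 < y1 ∧ y1 < lohi.2 then c + 1 else c) c
              = xs.foldl (fun c lohi => if (decide (lohi.1 < y1) && decide (y1 < lohi.2)) = true then c + 1 else c) c := by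
          intro c xs
          apply PySem.List.foldl_congr_mem
          intro acc p _
          simp
        rw [this, PySem.List.foldl_count_if, List.countP_map, List.countP_filter]
        norm_num
        apply List.countP_congr
        intro t _
        obtain ⟨⟨a, b⟩, ⟨c, d⟩⟩ := t
        simp [is_true_intersection, hv]
        omega
      · intro x
        simp only [bStep, if_pos hv]
        show ((l.foldl bStep (0, PySem.Dict.empty)).2.insert x1
            (((l.foldl bStep (0, PySem.Dict.empty)).2.getD x1 []) ++ [(min y1 y2, max y1 y2)])).getD x [] = _
        by_cases hx : x = x1
        · subst hx
          rw [PySem.Dict.getD_insert_self, ihd x]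
          rw [List.filter_append, List.map_append]
          simp [hv]
        · rw [PySem.Dict.getD_insert_of_ne _ _ _ hx, ihd x]
          rw [List.filter_append, List.map_append]
          have : ¬ (x1 = x) := fun h => hx h.symm
          simp [this]
    · constructor
      · simp only [bStep, if_neg hv]
        show (l.foldl bStep (0, PySem.Dict.empty)).1 = _
        rw [ihc, pairCount_append]
        have : l.countP (fun t => is_true_intersection t ((x1, y1), (x2, y2))) = 0 := by
          apply List.countP_eq_zero.mpr
          intro t _
          obtain ⟨⟨a, b⟩, ⟨c, d⟩⟩ := t
          simp [is_true_intersection]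
          intro h1 h2
          omega
        rw [this]; simp
      · intro x
        simp only [bStep, if_neg hv]
        show (l.foldl bStep (0, PySem.Dict.empty)).2.getD x [] = _
        rw [ihd x, List.filter_append, List.map_append]
        simp [hv]

-- ===== VERDICT (by name: the statement is the Claim_ definition above) =====
theorem count_true_intersections_spec : Claim_equal_count_true_intersections := by
  intro segments _
  show count_true_intersections segments = count_true_intersections_alt segments
  rw [A_eq_sum, sum_eq_pairCount, alt_eq_bStep, (bStep_invariant segments).1]
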